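-- pv_equiv track=rewrite | github.com/ostadabbas/Baby-Product-Video-Ads | scripts/utils.py | find_max_in_sequences
-- ===== SOURCE A (Python) =====
-- def find_max_in_sequences(data, min_gap=3):
--     """
--     Find the maximum value in each sequence of non-zero values, where a sequence is defined as a series of non-zero values separated by less than 3 consecutive zeros.
--
--     Args:
--         data (list): The input list of values.
--         min_gap (int): The minimum number of consecutive zeros required to consider a new sequence.
--
--     Returns:
--         list: A list of tuples, where each tuple contains the index and value of the maximum in a sequence.
--     """
--     max_in_sequences = []
--     in_segment = False
--     prev_value = 0
--     max_value = 0
--     max_index = 0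
--     zero_count = 0
--
--     for i, value in enumerate(data):
--         if value > 0:
--             if not in_segment or value > prev_value:
--                 in_segment = True
--                 prev_value = value
--                 max_value = value
--                 max_index = i
--             else:
--                 if value > max_value:
--                     max_value = value
--                     max_index = i
--             zero_count = 0
--         else:
--             zero_count += 1
--             if zero_count >= min_gap:
--                 if in_segment:
--                     max_in_sequences.append((max_index, max_value))
--                 in_segment = False
--                 prev_value = 0
--                 max_value = 0
--                 max_index = 0
--
--     if in_segment:
--         max_in_sequences.append((max_index, max_value))
--
--     return max_in_sequences
-- ===== SOURCE B (Python) =====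
-- def find_max_in_sequences(data, min_gap=3):
--     # Phase 1: partition into segments of positive (index, value) pairs,
--     # splitting whenever min_gap consecutive non-positive values occur.
--     segments = []
--     cur = []
--     gap = 0
--     for i, v in enumerate(data):
--         if v > 0:
--             cur.append((i, v))
--             gap = 0
--         else:
--             gap += 1
--             if gap >= min_gap and cur:
--                 segments.append(cur)
--                 cur = []
--     if cur:
--         segments.append(cur)
--     # Phase 2: first-occurring maximum of each segment.
--     result = []
--     for seg in segments:
--         best_i, best_v = seg[0]
--         for i, v in seg[1:]:
--             if v > best_v:
--                 best_i, best_v = i, v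
--         result.append((best_i, best_v))
--     return result
-- ===== Notes on version B (the rewrite author's own statement) =====
-- stated objective: simpler
-- what changed: Replaces A's single loop over six pieces of mutable state (in_segment/prev_value/max_value/max_index/zero_count) with a two-phase decomposition: first partition the positives into segments split by min_gap consecutive non-positives, then a separate pass takes the first-occurring maximum of each segment.
import Mathlib
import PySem

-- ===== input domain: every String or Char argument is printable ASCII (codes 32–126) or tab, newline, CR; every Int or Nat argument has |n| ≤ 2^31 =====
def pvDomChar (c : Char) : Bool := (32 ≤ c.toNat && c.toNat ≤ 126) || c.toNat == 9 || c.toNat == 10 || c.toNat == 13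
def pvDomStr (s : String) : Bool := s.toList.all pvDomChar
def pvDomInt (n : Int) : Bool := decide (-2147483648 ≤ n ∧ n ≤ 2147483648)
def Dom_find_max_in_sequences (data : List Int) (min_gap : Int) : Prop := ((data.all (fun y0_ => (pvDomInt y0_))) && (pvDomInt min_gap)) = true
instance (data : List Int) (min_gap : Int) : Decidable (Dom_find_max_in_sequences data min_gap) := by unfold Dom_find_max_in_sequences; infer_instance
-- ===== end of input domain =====

-- B replaces A's single loop over six pieces of mutable state with a two-phase
-- decomposition (partition into segments, then reduce each segment to its first
-- maximum); same cost, simpler structure.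

-- ===== PORT A =====
-- loop body of A, one step per (index, value) pair; state = (max_in_sequences, in_segment, prev_value, max_value, max_index, zero_count)
def stepA (min_gap : Int) (st : List (Int × Int) × Bool × Int × Int × Int × Int)
    (iv : Int × Int) : List (Int × Int) × Bool × Int × Int × Int × Int :=
  let (acc, inseg, prev, maxv, maxi, zc) := st
  let (i, v) := iv
  if v > 0 then
    if !inseg || v > prev then (acc, true, v, v, i, 0)
    else if v > maxv then (acc, true, prev, v, i, 0)
    else (acc, true, prev, maxv, maxi, 0)
  else
    if zc + 1 ≥ min_gap then
      ((if inseg then acc ++ [(maxi, maxv)] else acc), false, 0, 0, 0, zc + 1)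
    else (acc, inseg, prev, maxv, maxi, zc + 1)

-- the final 'if in_segment: append' of A
def finA (st : List (Int × Int) × Bool × Int × Int × Int × Int) : List (Int × Int) :=
  if st.2.1 then st.1 ++ [(st.2.2.2.2.1, st.2.2.2.1)] else st.1

def find_max_in_sequences (data : List Int) (min_gap : Int) : List (Int × Int) :=
  finA ((PySem.List.enumerate data).foldl (stepA min_gap) ([], false, 0, 0, 0, 0))

-- ===== PORT B =====
-- phase-1 loop body of B; state = (segments, cur, gap)
def stepB (min_gap : Int) (st : List (List (Int × Int)) × List (Int × Int) × Int)
    (iv : Int × Int) : List (List (Int × Int)) × List (Int × Int) × Int :=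
  let (segs, cur, gap) := st
  if iv.2 > 0 then (segs, cur ++ [(iv.1, iv.2)], 0)
  else if gap + 1 ≥ min_gap ∧ cur ≠ [] then (segs ++ [cur], [], gap + 1)
  else (segs, cur, gap + 1)

-- phase-2 of B: first-occurring maximum of a segment (explicit scan from the head)
def segMax (seg : List (Int × Int)) : Int × Int :=
  match seg with
  | [] => (0, 0)
  | h :: t => t.foldl (fun b p => if p.2 > b.2 then p else b) h

def find_max_in_sequences_alt (data : List Int) (min_gap : Int) : List (Int × Int) :=
  let s := (PySem.List.enumerate data).foldl (stepB min_gap) ([], [], 0)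
  (if s.2.1 ≠ [] then s.1 ++ [s.2.1] else s.1).map segMax

-- ===== PRECONDITION & SPEC =====
def Spec_find_max_in_sequences (data : List Int) (min_gap : Int) (out : List (Int × Int)) : Prop := out = find_max_in_sequences_alt data min_gap
instance (data : List Int) (min_gap : Int) (out : List (Int × Int)) : Decidable (Spec_find_max_in_sequences data min_gap out) := by unfold Spec_find_max_in_sequences; infer_instance

-- ===== CLAIM (what is proved, stated in full; the proofs are below) =====
def Claim_equal_find_max_in_sequences : Prop := ∀ (data : List Int) (min_gap : Int), Dom_find_max_in_sequences data min_gap → Spec_find_max_in_sequences data min_gap (find_max_in_sequences data min_gap)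

-- ===== LEMMAS AND PROOFS =====

lemma segMax_append (cur : List (Int × Int)) (h : cur ≠ []) (x : Int × Int) :
    segMax (cur ++ [x]) = if x.2 > (segMax cur).2 then x else segMax cur := by
  cases cur with
  | nil => exact absurd rfl h
  | cons a t => simp [segMax, List.foldl_append]

-- phase-2 view of B's final flush
def finB (st : List (List (Int × Int)) × List (Int × Int) × Int) : List (Int × Int) :=
  (if st.2.1 ≠ [] then st.1 ++ [st.2.1] else st.1).map segMax

lemma loop_inv (mg : Int) (l : List (Int × Int)) :
    ∀ (acc : List (Int × Int)) (inseg : Bool) (prev maxv maxi zc : Int)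
      (segs : List (List (Int × Int))) (cur : List (Int × Int)),
      acc = segs.map segMax →
      (inseg = true ↔ cur ≠ []) →
      (cur ≠ [] → segMax cur = (maxi, maxv) ∧ prev = maxv) →
      finA (l.foldl (stepA mg) (acc, inseg, prev, maxv, maxi, zc)) =
        finB (l.foldl (stepB mg) (segs, cur, zc)) := by
  induction l with
  | nil =>
    intro acc inseg prev maxv maxi zc segs cur hacc hiff hseg
    by_cases hc : cur = []
    · have : inseg = false := by
        cases inseg with
        | true => exact absurd (hiff.mp rfl) (by simp [hc])
        | false => rfl
      simp [finA, finB, this, hc, hacc]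
    · have hi : inseg = true := hiff.mpr hc
      obtain ⟨h1, _⟩ := hseg hc
      simp [finA, finB, hi, hc, hacc, h1]
  | cons x t ih =>
    intro acc inseg prev maxv maxi zc segs cur hacc hiff hseg
    obtain ⟨i, v⟩ := x
    by_cases hv : v > 0
    · -- positive value: both extend the current segment
      by_cases hc : cur = []
      · have hi : inseg = false := by
          cases inseg with
          | true => exact absurd (hiff.mp rfl) (by simp [hc])
          | false => rfl
        simp only [List.foldl_cons, stepA, stepB, hv, hi, hc, if_pos, Bool.not_false,
          Bool.true_or, if_true]
        apply ih
        · exact hacc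
        · simp
        · intro _; simp [segMax]
      · have hi : inseg = true := hiff.mpr hc
        obtain ⟨h1, h2⟩ := hseg hc
        by_cases hvp : v > prev
        · simp only [List.foldl_cons, stepA, stepB, hv, hi, if_pos, Bool.not_true,
            Bool.false_or, decide_eq_true hvp, if_true]
          apply ih
          · exact hacc
          · simp
          · intro _
            refine ⟨?_, rfl⟩
            rw [segMax_append cur hc (i, v), h1]
            have hgt : v > maxv := h2 ▸ hvp
            simp [hgt]
        · have hvm : ¬ v > maxv := by rw [← h2]; exact hvp
          simp only [List.foldl_cons, stepA, stepB, hv, hi, Bool.not_true, Bool.false_or,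
            decide_eq_false hvp, if_true, if_neg hvm]
          apply ih
          · exact hacc
          · simp
          · intro _
            rw [segMax_append cur hc (i, v)]
            have : ¬ ((i, v).2 > (segMax cur).2) := by rw [h1]; exact hvm
            simp only [if_neg this]
            exact ⟨h1, h2⟩
    · -- non-positive value: both count the gap, flush at min_gap
      by_cases hz : zc + 1 ≥ mg
      · by_cases hc : cur = []
        · have hi : inseg = false := by
            cases inseg with
            | true => exact absurd (hiff.mp rfl) (by simp [hc])
            | false => rfl
          simp only [List.foldl_cons, stepA, stepB, hv, hi, hc, hz, if_pos, if_neg,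
            Bool.false_eq_true, if_false, ne_eq, not_true_eq_false, and_false]
          apply ih
          · exact hacc
          · simp
          · intro h; exact absurd rfl h
        · have hi : inseg = true := hiff.mpr hc
          obtain ⟨h1, _⟩ := hseg hc
          simp only [List.foldl_cons, stepA, stepB, hv, hi, if_pos hz, if_true,
            if_pos (⟨hz, hc⟩ : zc + 1 ≥ mg ∧ cur ≠ [])]
          apply ih
          · simp [hacc, h1]
          · simp
          · intro h; exact absurd rfl h
      · simp only [List.foldl_cons, stepA, stepB, hv, if_neg hz,
          if_neg (by intro h; exact hz h.1 : ¬ (zc + 1 ≥ mg ∧ cur ≠ []))]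
        exact ih acc inseg prev maxv maxi (zc + 1) segs cur hacc hiff hseg

-- ===== VERDICT (by name: the statement is the Claim_ definition above) =====
theorem find_max_in_sequences_spec : Claim_equal_find_max_in_sequences := by
  intro data min_gap _
  unfold Spec_find_max_in_sequences find_max_in_sequences find_max_in_sequences_alt
  exact loop_inv min_gap (PySem.List.enumerate data) [] false 0 0 0 0 [] []
    rfl (by simp) (fun h => absurd rfl h)
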